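-- pv_equiv track=rewrite | github.com/andlcp/securo | tools/import-pipeline/push_to_securo.py | _custodian_from_b3_trades
-- ===== SOURCE A (Python) =====
-- def _custodian_from_b3_trades(trades: list[dict]) -> dict[str, str]:
--     """{ticker -> most-recent instituicao} so we can stamp Asset.custodian
--     on every B3 RV asset we create."""
--     latest: dict[str, dict] = {}
--     for t in trades:
--         tk = (t.get("ticker") or "").strip()
--         inst = (t.get("instituicao") or "").strip()
--         d = (t.get("data") or "")
--         if not tk or not inst:
--             continue
--         prev = latest.get(tk)
--         if prev is None or d > prev["d"]:
--             latest[tk] = {"d": d, "inst": inst}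
--     return {tk: v["inst"] for tk, v in latest.items()}
-- ===== SOURCE B (Python) =====
-- def _custodian_from_b3_trades(trades: list[dict]) -> dict[str, str]:
--     """{ticker -> most-recent instituicao}: group trades per ticker, then take
--     the first date-maximal entry per group (max keeps the first maximum, which
--     matches the running strict-> update)."""
--     groups: dict[str, list] = {}
--     for t in trades:
--         tk = (t.get("ticker") or "").strip()
--         inst = (t.get("instituicao") or "").strip()
--         d = (t.get("data") or "")
--         if not tk or not inst:
--             continue
--         groups.setdefault(tk, []).append((d, inst))
--     return {tk: max(entries, key=lambda e: e[0])[1] for tk, entries in groups.items()}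
-- ===== Notes on version B (the rewrite author's own statement) =====
-- stated objective: alternative
-- what changed: A keeps a running date-maximum per ticker inside one loop; B first groups all qualifying (data, instituicao) pairs per ticker and then, in a second pass, picks each group's first date-maximal entry with max(), which reproduces A's strict-> tie-breaking.
import Mathlib
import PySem

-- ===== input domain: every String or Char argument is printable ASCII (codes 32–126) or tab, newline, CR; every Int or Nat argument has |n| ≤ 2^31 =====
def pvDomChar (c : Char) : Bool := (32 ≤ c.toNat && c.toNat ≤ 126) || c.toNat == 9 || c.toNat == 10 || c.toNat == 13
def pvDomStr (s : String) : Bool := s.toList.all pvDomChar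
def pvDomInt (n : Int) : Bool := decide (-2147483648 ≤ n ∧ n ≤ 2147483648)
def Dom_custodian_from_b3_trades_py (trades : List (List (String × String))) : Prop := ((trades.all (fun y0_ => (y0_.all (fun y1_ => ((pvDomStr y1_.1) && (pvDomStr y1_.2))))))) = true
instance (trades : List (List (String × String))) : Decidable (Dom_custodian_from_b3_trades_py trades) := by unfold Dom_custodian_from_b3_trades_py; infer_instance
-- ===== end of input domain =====

-- B replaces A's single-loop running date-maximum per ticker by a group-then-reduce
-- decomposition (same cost, 'alternative'); return values proved equal.

-- Shared field accessor: `(t.get(k) or "")` on the dict t (given as an assoc list).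
def pvField (t : List (String × String)) (k : String) : String :=
  ((PySem.Dict.ofList t).get? k).getD ""

-- ===== PORT A =====
-- One loop iteration of A.  `d > prev["d"]` is Python's string <, ported exactly as
-- PySem.Chars.strLt (code-point lexicographic) on the character lists.
def pvAStep (latest : PySem.Dict String (String × String)) (t : List (String × String)) :
    PySem.Dict String (String × String) :=
  let tk := PySem.Str.strip (pvField t "ticker")
  let inst := PySem.Str.strip (pvField t "instituicao")
  let d := pvField t "data"
  if tk = "" ∨ inst = "" then latest
  else
    match latest.get? tk with
    | none => latest.insert tk (d, inst)
    | some prev =>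
        if PySem.Chars.strLt prev.1.toList d.toList then latest.insert tk (d, inst) else latest

def custodian_from_b3_trades_py (trades : List (List (String × String))) : List (String × String) :=
  ((trades.foldl pvAStep PySem.Dict.empty).items).map (fun p => (p.1, p.2.2))

-- ===== PORT B =====
-- `max(entries, key=lambda e: e[0])` returns the FIRST maximal element: ported exactly
-- as this left fold that replaces the best only on a strictly greater key (Python str <
-- = PySem.Chars.strLt on the character lists).  B never stores an empty group, so the
-- [] branch is unreachable.
def pvFirstMax : List (String × String) → (String × String)
  | [] => ("", "")
  | e :: es =>
      es.foldl (fun best x => if PySem.Chars.strLt best.1.toList x.1.toList then x else best) e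

-- One loop iteration of B.  `groups.setdefault(tk, []).append((d, inst))` is
-- Dict.modify tk [] (· ++ [(d, inst)]).
def pvBStep (groups : PySem.Dict String (List (String × String))) (t : List (String × String)) :
    PySem.Dict String (List (String × String)) :=
  let tk := PySem.Str.strip (pvField t "ticker")
  let inst := PySem.Str.strip (pvField t "instituicao")
  let d := pvField t "data"
  if tk = "" ∨ inst = "" then groups
  else groups.modify tk [] (fun es => es ++ [(d, inst)])

def custodian_from_b3_trades_py_alt (trades : List (List (String × String))) : List (String × String) :=
  ((trades.foldl pvBStep PySem.Dict.empty).items).map (fun p => (p.1, (pvFirstMax p.2).2))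

-- ===== PRECONDITION & SPEC =====
def Spec_custodian_from_b3_trades_py (trades : List (List (String × String))) (out : List (String × String)) : Prop := out = custodian_from_b3_trades_py_alt trades
instance (trades : List (List (String × String))) (out : List (String × String)) : Decidable (Spec_custodian_from_b3_trades_py trades out) := by unfold Spec_custodian_from_b3_trades_py; infer_instance

-- ===== CLAIM (what is proved, stated in full; the proofs are below) =====
def Claim_equal_custodian_from_b3_trades_py : Prop := ∀ (trades : List (List (String × String))), Dom_custodian_from_b3_trades_py trades → Spec_custodian_from_b3_trades_py trades (custodian_from_b3_trades_py trades)

-- ===== LEMMAS AND PROOFS =====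

-- Invariant relating A's running-max dict to B's group dict.
def pvRel (latest : PySem.Dict String (String × String))
    (groups : PySem.Dict String (List (String × String))) : Prop :=
  latest.keys = groups.keys ∧ groups.keys.Nodup ∧
    ∀ k, k ∈ groups.keys →
      latest.getD k ("", "") = pvFirstMax (groups.getD k []) ∧ groups.getD k [] ≠ []

theorem pvFirstMax_append (es : List (String × String)) (hne : es ≠ [])
    (x : String × String) :
    pvFirstMax (es ++ [x]) =
      if PySem.Chars.strLt (pvFirstMax es).1.toList x.1.toList then x else pvFirstMax es := by
  cases es with
  | nil => exact absurd rfl hne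
  | cons e es' => simp [pvFirstMax, List.foldl_append]

theorem pvRel_step (latest : PySem.Dict String (String × String))
    (groups : PySem.Dict String (List (String × String)))
    (t : List (String × String)) (h : pvRel latest groups) :
    pvRel (pvAStep latest t) (pvBStep groups t) := by
  obtain ⟨hk, hnd, hv⟩ := h
  simp only [pvAStep, pvBStep]
  set tk := PySem.Str.strip (pvField t "ticker") with htk
  set inst := PySem.Str.strip (pvField t "instituicao") with hinst
  set d := pvField t "data" with hd
  by_cases hskip : tk = "" ∨ inst = ""
  · simp only [if_pos hskip]; exact ⟨hk, hnd, hv⟩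
  · simp only [if_neg hskip]
    cases hget : latest.get? tk with
    | none =>
      have hmemL : tk ∉ latest.keys := (PySem.Dict.get?_eq_none_iff_not_mem_keys _ _).1 hget
      have hmemG : tk ∉ groups.keys := hk ▸ hmemL
      have hcL : latest.contains tk = false := by
        rw [PySem.Dict.contains_eq_decide_mem_keys]; simpa using hmemL
      have hcG : groups.contains tk = false := by
        rw [PySem.Dict.contains_eq_decide_mem_keys]; simpa using hmemG
      have hkeysG : (groups.modify tk [] (fun es => es ++ [(d, inst)])).keys
          = groups.keys ++ [tk] := by
        rw [PySem.Dict.keys_modify, PySem.Dict.keys_insert_of_not_contains _ _ hcG]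
      refine ⟨?_, ?_, ?_⟩
      · rw [PySem.Dict.keys_insert_of_not_contains _ _ hcL, hkeysG, hk]
      · rw [hkeysG]
        simp [List.nodup_append, hnd]
        intro a ha h
        exact hmemG (h ▸ ha)
      · intro k hkmem
        rw [hkeysG] at hkmem
        by_cases hke : k = tk
        · subst hke
          rw [PySem.Dict.getD_insert_self, PySem.Dict.getD_modify_self,
            PySem.Dict.getD_of_not_contains _ _ hcG]
          exact ⟨rfl, by simp⟩
        · have hkm : k ∈ groups.keys := by
            rcases List.mem_append.1 hkmem with h1 | h1
            · exact h1
            · exact absurd (List.mem_singleton.1 h1) hke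
          rw [PySem.Dict.getD_insert_of_ne _ _ _ hke, PySem.Dict.getD_modify,
            if_neg hke]
          exact hv k hkm
    | some prev =>
      have hmemL : tk ∈ latest.keys := by
        by_contra hno
        rw [(PySem.Dict.get?_eq_none_iff_not_mem_keys _ _).2 hno] at hget
        simp at hget
      have hmemG : tk ∈ groups.keys := hk ▸ hmemL
      have hcL : latest.contains tk = true := (PySem.Dict.contains_iff_mem_keys _ _).2 hmemL
      have hcG : groups.contains tk = true := (PySem.Dict.contains_iff_mem_keys _ _).2 hmemG
      have hprev : latest.getD tk ("", "") = prev := PySem.Dict.getD_of_get?_eq_some _ _ hget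
      obtain ⟨hmax, hnil⟩ := hv tk hmemG
      have hkeysG : (groups.modify tk [] (fun es => es ++ [(d, inst)])).keys = groups.keys := by
        rw [PySem.Dict.keys_modify, PySem.Dict.keys_insert_of_contains _ _ hcG]
      have hvals : ∀ k, k ∈ groups.keys → k ≠ tk →
          (groups.modify tk [] (fun es => es ++ [(d, inst)])).getD k []
            = groups.getD k [] := by
        intro k _ hke
        rw [PySem.Dict.getD_modify, if_neg hke]
      have hmaxnew : pvFirstMax ((groups.modify tk [] (fun es => es ++ [(d, inst)])).getD tk [])
          = if PySem.Chars.strLt prev.1.toList d.toList then (d, inst) else prev := by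
        rw [PySem.Dict.getD_modify_self, pvFirstMax_append _ hnil, ← hmax, hprev]
      cases hlt : PySem.Chars.strLt prev.1.toList d.toList with
      | true =>
        simp only [if_pos hlt]
        refine ⟨?_, ?_, ?_⟩
        · rw [PySem.Dict.keys_insert_of_contains _ _ hcL, hkeysG, hk]
        · rw [hkeysG]; exact hnd
        · intro k hkmem
          rw [hkeysG] at hkmem
          by_cases hke : k = tk
          · subst hke
            rw [PySem.Dict.getD_insert_self, hmaxnew, if_pos hlt]
            refine ⟨rfl, ?_⟩
            rw [PySem.Dict.getD_modify_self]
            simp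
          · rw [PySem.Dict.getD_insert_of_ne _ _ _ hke, hvals k hkmem hke]
            exact hv k hkmem
      | false =>
        simp only [if_neg (by simp [hlt] : ¬ PySem.Chars.strLt prev.1.toList d.toList = true)]
        refine ⟨hk.trans hkeysG.symm, by rw [hkeysG]; exact hnd, ?_⟩
        intro k hkmem
        rw [hkeysG] at hkmem
        by_cases hke : k = tk
        · subst hke
          constructor
          · rw [hmaxnew, if_neg (by simp [hlt]), hprev]
          · rw [PySem.Dict.getD_modify_self]; simp
        · rw [hvals k hkmem hke]
          exact hv k hkmem

theorem pvRel_foldl (ts : List (List (String × String)))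
    (latest : PySem.Dict String (String × String))
    (groups : PySem.Dict String (List (String × String))) (h : pvRel latest groups) :
    pvRel (ts.foldl pvAStep latest) (ts.foldl pvBStep groups) := by
  induction ts generalizing latest groups with
  | nil => exact h
  | cons t ts ih => exact ih _ _ (pvRel_step _ _ t h)

theorem pvRel_out (latest : PySem.Dict String (String × String))
    (groups : PySem.Dict String (List (String × String))) (h : pvRel latest groups) :
    latest.items.map (fun p => (p.1, p.2.2))
      = groups.items.map (fun p => (p.1, (pvFirstMax p.2).2)) := by
  obtain ⟨hk, hnd, hv⟩ := h
  rw [PySem.Dict.items_eq_map_keys latest (hk ▸ hnd) ("", ""),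
    PySem.Dict.items_eq_map_keys groups hnd [], hk, List.map_map, List.map_map]
  refine List.map_congr_left ?_
  intro k hkm
  simp only [Function.comp]
  rw [(hv k hkm).1]

-- ===== VERDICT (by name: the statement is the Claim_ definition above) =====
theorem custodian_from_b3_trades_py_spec : Claim_equal_custodian_from_b3_trades_py := by
  intro trades _
  unfold Spec_custodian_from_b3_trades_py custodian_from_b3_trades_py
    custodian_from_b3_trades_py_alt
  refine pvRel_out _ _ (pvRel_foldl trades _ _ ?_)
  refine ⟨?_, ?_, ?_⟩ <;> simp [PySem.Dict.keys_empty]
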